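-- pv_equiv track=rewrite | github.com/ClarityNLP/ClarityNLP | native_setup/validate_results0.py | _validate_ejection_fraction_results
-- ===== SOURCE A (Python) =====
-- def _fields_exist(field_list, row_dict):
--
--     for f in field_list:
--         if f not in row_dict:
--             return False
--     return True
--
-- def _validate_ejection_fraction_results(results):
--
--     FIELDS = ['text', 'value', 'condition']
--
--     EXPECTED_VALUES = set(['40', '75'])
--
--     if 2 != len(results):
--         return False
--
--     for result in results:
--
--         if not _fields_exist(FIELDS, result):
--             return False
--
--         text  = result['text']
--         value = result['value']
--         condition = result['condition']
--
--         if value == '40':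
--             if text != 'LVEF' and condition != 'LESS_THAN':
--                 return False
--             if '40' in EXPECTED_VALUES:
--                 EXPECTED_VALUES.remove('40')
--             else:
--                 return False
--         elif value == '75':
--             if text != 'ejection fraction' and condition != 'EQUAL':
--                 return False
--             if '75' in EXPECTED_VALUES:
--                 EXPECTED_VALUES.remove('75')
--             else:
--                 return False
--         else:
--             return False
--
--     return True
-- ===== SOURCE B (Python) =====
-- def _validate_ejection_fraction_results(results):
--     FIELDS = ('text', 'value', 'condition')
--
--     if len(results) != 2:
--         return False
--
--     if any(f not in r for r in results for f in FIELDS):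
--         return False
--
--     by_value = {r['value']: r for r in results}
--     if set(by_value) != {'40', '75'}:
--         return False
--
--     r40 = by_value['40']
--     r75 = by_value['75']
--     if r40['text'] != 'LVEF' and r40['condition'] != 'LESS_THAN':
--         return False
--     if r75['text'] != 'ejection fraction' and r75['condition'] != 'EQUAL':
--         return False
--     return True
-- ===== Notes on version B (the rewrite author's own statement) =====
-- stated objective: simpler
-- what changed: Replaces A's sequential loop that dispatches on each record's value while mutating an expected-values set with a value-indexed dict plus one set-equality check (set(by_value) == {'40','75'}) followed by two direct lookups and the condition checks.
import Mathlib
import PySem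

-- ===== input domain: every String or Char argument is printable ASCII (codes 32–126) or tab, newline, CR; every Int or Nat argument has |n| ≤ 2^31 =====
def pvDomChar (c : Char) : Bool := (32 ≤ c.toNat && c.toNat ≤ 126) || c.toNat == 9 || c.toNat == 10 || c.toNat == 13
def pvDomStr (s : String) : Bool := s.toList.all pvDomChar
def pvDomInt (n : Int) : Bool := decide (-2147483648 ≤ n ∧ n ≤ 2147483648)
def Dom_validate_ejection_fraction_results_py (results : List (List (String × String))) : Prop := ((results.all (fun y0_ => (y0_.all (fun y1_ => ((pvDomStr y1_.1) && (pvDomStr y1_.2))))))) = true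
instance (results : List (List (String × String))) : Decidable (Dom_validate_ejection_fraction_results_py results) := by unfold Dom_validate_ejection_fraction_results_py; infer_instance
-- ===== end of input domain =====

-- ===== PORT A =====
-- B re-checks the same records via a value-indexed dict and one set equality instead of A's
-- sequential loop mutating an expected-values set (objective: simpler decomposition, same cost).

-- helper of A: _fields_exist (membership 'f not in row_dict' is exact via Dict.contains)
def pvFieldsExist (field_list : List String) (row_dict : List (String × String)) : Bool :=
  match field_list with
  | [] => true
  | f :: rest =>
    if (PySem.Dict.mk row_dict).contains f = false then false
    else pvFieldsExist rest row_dict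

-- the for-loop of A, carrying the mutable EXPECTED_VALUES set; the getD "" lookups are exact
-- because they run only after pvFieldsExist guaranteed the key is present, and Set.discard is
-- exact for .remove because it runs only after the membership test.
def pvEfLoop (rs : List (List (String × String))) (expected : PySem.Set String) : Bool :=
  match rs with
  | [] => true
  | r :: rest =>
    if pvFieldsExist ["text", "value", "condition"] r = false then false
    else
      let text := (PySem.Dict.mk r).getD "text" ""
      let value := (PySem.Dict.mk r).getD "value" ""
      let condition := (PySem.Dict.mk r).getD "condition" ""
      if value == "40" then
        if text ≠ "LVEF" ∧ condition ≠ "LESS_THAN" then false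
        else if PySem.Set.contains expected "40" then pvEfLoop rest (PySem.Set.discard expected "40")
        else false
      else if value == "75" then
        if text ≠ "ejection fraction" ∧ condition ≠ "EQUAL" then false
        else if PySem.Set.contains expected "75" then pvEfLoop rest (PySem.Set.discard expected "75")
        else false
      else false

def validate_ejection_fraction_results_py (results : List (List (String × String))) : Bool :=
  if ((2 : Int) ≠ results.length) then false
  else pvEfLoop results (PySem.Set.ofList ["40", "75"])

-- ===== PORT B =====
-- r[k] lookup on a record (used by B only where presence was already checked)
def pvGetB (r : List (String × String)) (k : String) : String :=
  (PySem.Dict.mk r).getD k ""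

def validate_ejection_fraction_results_py_alt (results : List (List (String × String))) : Bool :=
  if results.length ≠ 2 then false
  else if results.any (fun r =>
      (["text", "value", "condition"] : List String).any (fun f => !(PySem.Dict.mk r).contains f)) then false
  else
    let by_value : PySem.Dict String (List (String × String)) :=
      results.foldl (fun d r => d.insert (pvGetB r "value") r) PySem.Dict.empty
    if PySem.Set.equal (PySem.Set.ofList by_value.keys) (PySem.Set.ofList ["40", "75"]) = false then false
    else
      let r40 := by_value.getD "40" []
      let r75 := by_value.getD "75" []
      if pvGetB r40 "text" ≠ "LVEF" ∧ pvGetB r40 "condition" ≠ "LESS_THAN" then false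
      else if pvGetB r75 "text" ≠ "ejection fraction" ∧ pvGetB r75 "condition" ≠ "EQUAL" then false
      else true

-- ===== PRECONDITION & SPEC =====
def Spec_validate_ejection_fraction_results_py (results : List (List (String × String))) (out : Bool) : Prop := out = validate_ejection_fraction_results_py_alt results
instance (results : List (List (String × String))) (out : Bool) : Decidable (Spec_validate_ejection_fraction_results_py results out) := by unfold Spec_validate_ejection_fraction_results_py; infer_instance

-- ===== CLAIM (what is proved, stated in full; the proofs are below) =====
def Claim_equal_validate_ejection_fraction_results_py : Prop := ∀ (results : List (List (String × String))), Dom_validate_ejection_fraction_results_py results → Spec_validate_ejection_fraction_results_py results (validate_ejection_fraction_results_py results)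

-- ===== LEMMAS AND PROOFS =====

theorem pvKeys2 (x y : String) (a b : List (String × String)) :
    ((PySem.Dict.empty.insert x a).insert y b).keys = if y = x then [x] else [x, y] := by
  split_ifs with h
  · subst h
    rw [PySem.Dict.keys_insert_of_contains _ _ (PySem.Dict.contains_insert_self _ _ _),
        PySem.Dict.keys_insert_of_not_contains _ _ (PySem.Dict.contains_empty _)]
    simp [PySem.Dict.keys_empty]
  · rw [PySem.Dict.keys_insert_of_not_contains _ _
        (by simp [PySem.Dict.contains_insert, PySem.Dict.contains_empty, h]),
        PySem.Dict.keys_insert_of_not_contains _ _ (PySem.Dict.contains_empty _)]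
    simp [PySem.Dict.keys_empty]

theorem pvEqSet (x y : String) :
    PySem.Set.equal (PySem.Set.ofList (if y = x then [x] else [x, y])) (PySem.Set.ofList ["40", "75"]) =
      (decide (x = "40" ∧ y = "75") || decide (x = "75" ∧ y = "40")) := by
  split_ifs with h
  · subst h
    simp only [PySem.Set.equal, PySem.Set.issubset, PySem.Set.ofList,
      PySem.Set.contains, PySem.Set.empty]
    by_cases hy40 : y = "40" <;> by_cases hy75 : y = "75" <;> simp_all
  · simp only [PySem.Set.equal, PySem.Set.issubset, PySem.Set.ofList,
      PySem.Set.contains, PySem.Set.empty]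
    by_cases hx40 : x = "40" <;> by_cases hx75 : x = "75" <;>
    by_cases hy40 : y = "40" <;> by_cases hy75 : y = "75" <;>
    simp_all

set_option maxHeartbeats 2000000 in
theorem ef_two (a b : List (String × String)) :
    validate_ejection_fraction_results_py [a, b] = validate_ejection_fraction_results_py_alt [a, b] := by
  simp only [validate_ejection_fraction_results_py, validate_ejection_fraction_results_py_alt,
    pvEfLoop, pvFieldsExist, pvGetB, List.any, List.foldl, List.length]
  rw [pvKeys2, pvEqSet]
  by_cases h1 : (PySem.Dict.mk a).getD "value" "" = "40" <;>
  by_cases h2 : (PySem.Dict.mk b).getD "value" "" = "40" <;>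
  by_cases h3 : (PySem.Dict.mk a).getD "value" "" = "75" <;>
  by_cases h4 : (PySem.Dict.mk b).getD "value" "" = "75" <;>
  simp_all [PySem.Dict.getD_insert, PySem.Set.ofList, PySem.Set.add, PySem.Set.contains,
    PySem.Set.discard, PySem.Set.empty, Bool.and_assoc, Bool.and_comm, Bool.and_left_comm]

-- ===== VERDICT (by name: the statement is the Claim_ definition above) =====
theorem validate_ejection_fraction_results_py_spec : Claim_equal_validate_ejection_fraction_results_py := by
  intro results _
  unfold Spec_validate_ejection_fraction_results_py
  match results with
  | [] => decide
  | [a] => simp [validate_ejection_fraction_results_py, validate_ejection_fraction_results_py_alt]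
  | [a, b] => exact ef_two a b
  | a :: b :: c :: rest =>
    simp [validate_ejection_fraction_results_py, validate_ejection_fraction_results_py_alt]
    omega
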